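-- pv_equiv track=rewrite | github.com/alejandroJaramillo87/cognitopo | benchmark_tests/evaluator/cultural/cross_cultural_coherence.py | _detect_multiple_cultural_traditions
-- ===== SOURCE A (Python) =====
-- from typing import Dict, List, Set, Tuple, Optional
--
-- def _detect_multiple_cultural_traditions(systems_mentioned: Dict[str, Dict]) -> bool:
--     """Detect if multiple distinct cultural traditions are mentioned within categories"""
--     # Check if eastern category contains both Indian and Chinese traditions
--     if 'eastern' in systems_mentioned:
--         terms = systems_mentioned['eastern']['terms']
--
--         # Indian tradition indicators
--         indian_terms = ['ayurveda', 'ayurvedic', 'vedic', 'yoga', 'siddha', 'unani']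
--         # Chinese tradition indicators
--         chinese_terms = ['chinese', 'tcm', 'confucian', 'taoist', 'zen']
--
--         has_indian = any(any(indian_term in term.lower() for indian_term in indian_terms) for term in terms)
--         has_chinese = any(any(chinese_term in term.lower() for chinese_term in chinese_terms) for term in terms)
--
--         if has_indian and has_chinese:
--             return True
--
--     # Could add similar logic for other categories
--     return False
-- ===== SOURCE B (Python) =====
-- def _detect_multiple_cultural_traditions(systems_mentioned):
--     """Single pass over the terms with two flags and an early return."""
--     if 'eastern' in systems_mentioned:
--         has_indian = False
--         has_chinese = False
--         for term in systems_mentioned['eastern']['terms']: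
--             t = term.lower()
--             if not has_indian:
--                 has_indian = any(k in t for k in ('ayurveda', 'ayurvedic', 'vedic', 'yoga', 'siddha', 'unani'))
--             if not has_chinese:
--                 has_chinese = any(k in t for k in ('chinese', 'tcm', 'confucian', 'taoist', 'zen'))
--             if has_indian and has_chinese:
--                 return True
--     return False
-- ===== Notes on version B (the rewrite author's own statement) =====
-- stated objective: alternative
-- what changed: Replaces A's two independent full any()-scans over the terms list with a single loop that lowercases each term once, maintains two flags, and returns True early as soon as both traditions have been seen.
import Mathlib
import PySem

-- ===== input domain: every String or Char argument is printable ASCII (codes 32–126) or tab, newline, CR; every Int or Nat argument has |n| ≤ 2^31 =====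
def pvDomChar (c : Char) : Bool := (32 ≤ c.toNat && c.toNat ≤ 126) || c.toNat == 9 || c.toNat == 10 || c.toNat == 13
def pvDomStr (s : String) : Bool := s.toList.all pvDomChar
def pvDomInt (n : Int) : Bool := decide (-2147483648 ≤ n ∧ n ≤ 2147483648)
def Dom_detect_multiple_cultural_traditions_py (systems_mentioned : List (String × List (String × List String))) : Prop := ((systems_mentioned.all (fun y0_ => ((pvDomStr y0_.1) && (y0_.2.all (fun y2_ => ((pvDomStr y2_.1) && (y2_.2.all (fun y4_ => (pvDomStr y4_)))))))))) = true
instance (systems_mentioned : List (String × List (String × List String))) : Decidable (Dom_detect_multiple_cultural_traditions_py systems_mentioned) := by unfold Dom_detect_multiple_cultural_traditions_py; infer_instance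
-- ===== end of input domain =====

-- ===== PORT A =====
-- B changes the decomposition only (one flagged pass with early exit instead of two full scans); equal return value proved on Pre_.
def pvIndianTerms : List String := ["ayurveda", "ayurvedic", "vedic", "yoga", "siddha", "unani"]
def pvChineseTerms : List String := ["chinese", "tcm", "confucian", "taoist", "zen"]

def detect_multiple_cultural_traditions_py (systems_mentioned : List (String × List (String × List String))) : Bool :=
  let d := PySem.Dict.mk systems_mentioned
  if PySem.Dict.contains d "eastern" then
    match PySem.Dict.get? (PySem.Dict.mk (PySem.Dict.getD d "eastern" [])) "terms" with
    | none => false  -- KeyError in Python; excluded by Pre_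
    | some terms =>
      let has_indian := terms.any (fun term => pvIndianTerms.any (fun it => PySem.Str.isIn it (PySem.Str.lower term)))
      let has_chinese := terms.any (fun term => pvChineseTerms.any (fun ct => PySem.Str.isIn ct (PySem.Str.lower term)))
      if has_indian && has_chinese then true else false
  else false

-- ===== PORT B =====
-- the single flagged loop of Source B: lowercase once, update the two flags, return true as soon as both hold
def pvAltLoop : List String → Bool → Bool → Bool
  | [], _, _ => false
  | term :: rest, has_indian, has_chinese =>
    let t := PySem.Str.lower term
    let hi := if has_indian then has_indian else pvIndianTerms.any (fun k => PySem.Str.isIn k t)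
    let hc := if has_chinese then has_chinese else pvChineseTerms.any (fun k => PySem.Str.isIn k t)
    if hi && hc then true else pvAltLoop rest hi hc

def detect_multiple_cultural_traditions_py_alt (systems_mentioned : List (String × List (String × List String))) : Bool :=
  let d := PySem.Dict.mk systems_mentioned
  if PySem.Dict.contains d "eastern" then
    match PySem.Dict.get? (PySem.Dict.mk (PySem.Dict.getD d "eastern" [])) "terms" with
    | none => false  -- KeyError in Python; excluded by Pre_
    | some terms => pvAltLoop terms false false
  else false

-- ===== PRECONDITION & SPEC =====
-- Pre_ excludes exactly the inputs where both A and B raise KeyError: 'eastern' is present but its dict has no 'terms' key.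
def Pre_detect_multiple_cultural_traditions_py (systems_mentioned : List (String × List (String × List String))) : Prop :=
  PySem.Dict.contains (PySem.Dict.mk systems_mentioned) "eastern" = true →
    PySem.Dict.contains (PySem.Dict.mk (PySem.Dict.getD (PySem.Dict.mk systems_mentioned) "eastern" [])) "terms" = true
instance (systems_mentioned : List (String × List (String × List String))) : Decidable (Pre_detect_multiple_cultural_traditions_py systems_mentioned) := by unfold Pre_detect_multiple_cultural_traditions_py; infer_instance

def pvWitness_detect_multiple_cultural_traditions_py : (List (String × List (String × List String))) :=
  [("eastern", [("terms", ["Yoga class", "TCM herbs"])])]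

def Spec_detect_multiple_cultural_traditions_py (systems_mentioned : List (String × List (String × List String))) (out : Bool) : Prop := out = detect_multiple_cultural_traditions_py_alt systems_mentioned
instance (systems_mentioned : List (String × List (String × List String))) (out : Bool) : Decidable (Spec_detect_multiple_cultural_traditions_py systems_mentioned out) := by unfold Spec_detect_multiple_cultural_traditions_py; infer_instance

-- ===== CLAIM =====
def Claim_equal_detect_multiple_cultural_traditions_py : Prop := ∀ (systems_mentioned : List (String × List (String × List String))), Dom_detect_multiple_cultural_traditions_py systems_mentioned → Pre_detect_multiple_cultural_traditions_py systems_mentioned → Spec_detect_multiple_cultural_traditions_py systems_mentioned (detect_multiple_cultural_traditions_py systems_mentioned)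

-- ===== LEMMAS AND PROOFS =====
theorem pvAltLoop_eq (terms : List String) (hi hc : Bool) (h : (hi && hc) = false) :
    pvAltLoop terms hi hc =
      ((hi || terms.any (fun term => pvIndianTerms.any (fun k => PySem.Str.isIn k (PySem.Str.lower term)))) &&
       (hc || terms.any (fun term => pvChineseTerms.any (fun k => PySem.Str.isIn k (PySem.Str.lower term))))) := by
  induction terms generalizing hi hc with
  | nil =>
    simp only [pvAltLoop, List.any_nil, Bool.or_false]
    exact h.symm
  | cons t rest ih =>
    simp only [pvAltLoop, List.any_cons]
    have hhi : (if hi then hi else pvIndianTerms.any (fun k => PySem.Str.isIn k (PySem.Str.lower t))) = (hi || pvIndianTerms.any (fun k => PySem.Str.isIn k (PySem.Str.lower t))) := by cases hi <;> simp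
    have hhc : (if hc then hc else pvChineseTerms.any (fun k => PySem.Str.isIn k (PySem.Str.lower t))) = (hc || pvChineseTerms.any (fun k => PySem.Str.isIn k (PySem.Str.lower t))) := by cases hc <;> simp
    rw [hhi, hhc]
    by_cases hb : ((hi || pvIndianTerms.any (fun k => PySem.Str.isIn k (PySem.Str.lower t))) && (hc || pvChineseTerms.any (fun k => PySem.Str.isIn k (PySem.Str.lower t)))) = true
    · rw [if_pos hb]
      rw [Bool.and_eq_true] at hb
      rw [← Bool.or_assoc, ← Bool.or_assoc, hb.1, hb.2]
      simp only [Bool.true_or, Bool.and_self]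
    · have hb' : ((hi || pvIndianTerms.any (fun k => PySem.Str.isIn k (PySem.Str.lower t))) && (hc || pvChineseTerms.any (fun k => PySem.Str.isIn k (PySem.Str.lower t)))) = false := Bool.eq_false_iff.mpr hb
      rw [if_neg hb, ih _ _ hb']
      rw [Bool.or_assoc, Bool.or_assoc]

-- ===== VERDICT =====
theorem detect_multiple_cultural_traditions_py_spec : Claim_equal_detect_multiple_cultural_traditions_py := by
  intro sm _ pre
  unfold Spec_detect_multiple_cultural_traditions_py
  unfold detect_multiple_cultural_traditions_py detect_multiple_cultural_traditions_py_alt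
  simp only []
  by_cases h : PySem.Dict.contains (PySem.Dict.mk sm) "eastern" = true
  · rw [if_pos h, if_pos h]
    have hin := pre h
    cases hg : PySem.Dict.get? (PySem.Dict.mk (PySem.Dict.getD (PySem.Dict.mk sm) "eastern" [])) "terms" with
    | none =>
      exfalso
      rw [PySem.Dict.contains_eq_isSome_get?, hg] at hin
      simp at hin
    | some terms =>
      simp only [pvAltLoop_eq terms false false rfl, Bool.false_or]
      split
      · next hcond => exact hcond.symm
      · next hcond => exact (Bool.eq_false_iff.mpr hcond).symm
  · rw [if_neg h, if_neg h]
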